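-- pv_equiv track=rewrite | github.com/here0009/LeetCode | Python/1554_StringsDifferbyOneCharacter.py | differByOne
-- ===== SOURCE A (Python) =====
-- from typing import List
-- from typing import List
--
-- def differByOne(dict: List[str]) -> bool:
--     seen = set()
--     for string in dict:
--         for j in range(len(string)):
--             tmp = string[:j] + '?' + string[j+1:]
--             if tmp in seen:
--                 return True
--             seen.add(tmp)
--     return False
-- ===== SOURCE B (Python) =====
-- def differByOne(dict):
--     patterns = [s[:j] + '?' + s[j+1:] for s in dict for j in range(len(s))]
--     patterns.sort()
--     return any(a == b for a, b in zip(patterns, patterns[1:]))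
-- ===== Notes on version B (the rewrite author's own statement) =====
-- stated objective: alternative
-- what changed: A streams wildcard patterns through a seen-set and stops at the first repeat; B materialises the full wildcard-pattern list, sorts it, and reports whether two neighbours are equal (a duplicate exists).
import Mathlib
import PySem

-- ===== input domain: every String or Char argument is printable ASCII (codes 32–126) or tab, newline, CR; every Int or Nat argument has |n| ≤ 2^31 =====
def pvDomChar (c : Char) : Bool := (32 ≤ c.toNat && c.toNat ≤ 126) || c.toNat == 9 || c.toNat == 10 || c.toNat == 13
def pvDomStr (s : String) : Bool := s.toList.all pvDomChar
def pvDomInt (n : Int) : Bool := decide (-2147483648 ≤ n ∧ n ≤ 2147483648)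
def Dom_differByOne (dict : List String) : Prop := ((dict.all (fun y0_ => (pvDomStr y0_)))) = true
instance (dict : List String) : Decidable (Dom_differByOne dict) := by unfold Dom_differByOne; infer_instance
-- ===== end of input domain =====

-- B replaces A's streaming seen-set with sort-then-scan over the full wildcard-pattern list (same answer; objective: alternative).
-- Strings are handled as their character lists (PySem.Chars convention); '+' on Python strings is '++' on the lists.

-- ===== PORT A =====
-- tmp = string[:j] + '?' + string[j+1:]
def pvWild (s : List Char) (j : Int) : List Char :=
  PySem.List.slice s none (some j) ++ ['?'] ++ PySem.List.slice s (some (j + 1)) none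

-- inner 'for j in range(len(string))' with early return (none = returned True)
def pvAJ (s : List Char) : List Int → PySem.Set (List Char) → Option (PySem.Set (List Char))
  | [], seen => some seen
  | j :: js, seen =>
    let tmp := pvWild s j
    if PySem.Set.contains seen tmp then none
    else pvAJ s js (PySem.Set.add seen tmp)

-- outer 'for string in dict'
def pvAS : List String → PySem.Set (List Char) → Bool
  | [], _ => false
  | s :: ss, seen =>
    match pvAJ s.toList (PySem.List.pyRange 0 (PySem.Str.len s) 1) seen with
    | none => true
    | some seen' => pvAS ss seen'

def differByOne (dict : List String) : Bool := pvAS dict PySem.Set.empty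

-- ===== PORT B =====
-- patterns = [s[:j] + '?' + s[j+1:] for s in dict for j in range(len(s))]
-- patterns.sort()                      (Python compares strings lexicographically: the lex order on List Char)
-- return any(a == b for a, b in zip(patterns, patterns[1:]))
def differByOne_alt (dict : List String) : Bool :=
  let patterns := dict.flatMap (fun s =>
    (PySem.List.pyRange 0 (PySem.Str.len s) 1).map (fun j =>
      PySem.List.slice s.toList none (some j) ++ ['?'] ++ PySem.List.slice s.toList (some (j + 1)) none))
  let sortedPs := @PySem.List.sorted (List Char) (List Char) List.instLinearOrder.toLT
    LinearOrder.toDecidableLT patterns (fun x => x) false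
  (sortedPs.zip (PySem.List.slice sortedPs (some 1) none)).any (fun p => p.1 == p.2)

-- ===== PRECONDITION & SPEC =====
def Spec_differByOne (dict : List String) (out : Bool) : Prop := out = differByOne_alt dict
instance (dict : List String) (out : Bool) : Decidable (Spec_differByOne dict out) := by unfold Spec_differByOne; infer_instance

-- ===== CLAIM (what is proved, stated in full; the proofs are below) =====
def Claim_equal_differByOne : Prop := ∀ (dict : List String), Dom_differByOne dict → Spec_differByOne dict (differByOne dict)

-- ===== LEMMAS AND PROOFS =====

-- all wildcard patterns of the whole list, in generation order
def pvPats (ss : List String) : List (List Char) :=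
  ss.flatMap (fun s => (PySem.List.pyRange 0 (PySem.Str.len s) 1).map (pvWild s.toList))

lemma pvSet_add_of_not_mem (seen : PySem.Set (List Char)) (x : List Char) (h : x ∉ seen) :
    PySem.Set.add seen x = seen ++ [x] := by
  have hc : PySem.Set.contains seen x = false := by
    by_contra hc
    exact h ((PySem.Set.contains_iff _ _).1 (Bool.not_eq_false _ ▸ hc))
  simp only [PySem.Set.add]
  rw [hc]
  simp

-- A's inner loop: 'none' iff seen ++ the patterns of s carry a duplicate; otherwise it returns exactly that list
lemma pvAJ_iff (s : List Char) (js : List Int) :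
    ∀ (seen : PySem.Set (List Char)), seen.Nodup →
      (pvAJ s js seen = none ↔ ¬ (seen ++ js.map (pvWild s)).Nodup) ∧
      (∀ seen', pvAJ s js seen = some seen' → seen' = seen ++ js.map (pvWild s) ∧ seen'.Nodup) := by
  induction js with
  | nil =>
    intro seen hnd
    constructor
    · simp [pvAJ, hnd]
    · intro seen' h
      simp only [pvAJ, Option.some.injEq] at h
      subst h; simp [hnd]
  | cons j js ih =>
    intro seen hnd
    by_cases hw : pvWild s j ∈ seen
    · have hcont : PySem.Set.contains seen (pvWild s j) = true := (PySem.Set.contains_iff _ _).2 hw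
      have hstep : pvAJ s (j :: js) seen = none := by
        simp only [pvAJ]; rw [hcont]; simp
      constructor
      · rw [hstep]
        simp only [List.map_cons, true_iff]
        intro hnodup
        obtain ⟨_, _, hdis⟩ := List.nodup_append.1 hnodup
        exact hdis _ hw _ (by simp) rfl
      · intro seen' h; rw [hstep] at h; cases h
    · have hstep : pvAJ s (j :: js) seen = pvAJ s js (seen ++ [pvWild s j]) := by
        have hcont : PySem.Set.contains seen (pvWild s j) = false := by
          by_contra hc
          exact hw ((PySem.Set.contains_iff _ _).1 (Bool.not_eq_false _ ▸ hc))
        simp only [pvAJ]; rw [hcont]; simp [pvSet_add_of_not_mem seen _ hw]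
      have hnd' : (seen ++ [pvWild s j]).Nodup := by
        refine List.nodup_append.2 ⟨hnd, List.nodup_singleton _, ?_⟩
        intro a ha b hb
        rw [List.mem_singleton] at hb
        subst hb
        exact fun he => hw (he ▸ ha)
      obtain ⟨ih1, ih2⟩ := ih (seen ++ [pvWild s j]) hnd'
      have hassoc : (seen ++ [pvWild s j]) ++ js.map (pvWild s)
          = seen ++ (j :: js).map (pvWild s) := by
        simp
      constructor
      · rw [hstep, ih1, hassoc]
      · intro seen' h
        rw [hstep] at h
        obtain ⟨he, hn⟩ := ih2 seen' h
        exact ⟨by rw [he, hassoc], hn⟩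

-- A's outer loop accumulates all patterns; it answers true iff a duplicate exists
lemma pvAS_iff : ∀ (ss : List String) (seen : PySem.Set (List Char)), seen.Nodup →
    (pvAS ss seen = true ↔ ¬ (seen ++ pvPats ss).Nodup) := by
  intro ss
  induction ss with
  | nil => intro seen hnd; simp [pvAS, pvPats, hnd]
  | cons s ss ih =>
    intro seen hnd
    obtain ⟨h1, h2⟩ := pvAJ_iff s.toList (PySem.List.pyRange 0 (PySem.Str.len s) 1) seen hnd
    have hpats : pvPats (s :: ss)
        = (PySem.List.pyRange 0 (PySem.Str.len s) 1).map (pvWild s.toList) ++ pvPats ss := by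
      simp [pvPats]
    rcases hAJ : pvAJ s.toList (PySem.List.pyRange 0 (PySem.Str.len s) 1) seen with _ | seen'
    · have htrue : pvAS (s :: ss) seen = true := by
        simp only [pvAS]; rw [hAJ]
      rw [htrue]
      simp only [true_iff]
      intro hnodup
      refine (h1.1 hAJ) (List.Nodup.sublist ?_ hnodup)
      rw [hpats, ← List.append_assoc]
      exact (List.sublist_append_left _ _)
    · obtain ⟨he, hn⟩ := h2 seen' hAJ
      have hstep : pvAS (s :: ss) seen = pvAS ss seen' := by
        simp only [pvAS]; rw [hAJ]
      rw [hstep, ih seen' hn, he, hpats, List.append_assoc]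

lemma pvA_iff (dict : List String) : differByOne dict = true ↔ ¬ (pvPats dict).Nodup := by
  unfold differByOne
  have h := pvAS_iff dict PySem.Set.empty (by simp [PySem.Set.empty])
  simpa [PySem.Set.empty] using h

-- in a ≤-sorted list a duplicate exists iff two neighbours are equal
lemma pvAdj_iff (l : List (List Char)) (h : l.Pairwise (· ≤ ·)) :
    ((l.zip l.tail).any (fun p => p.1 == p.2) = true) ↔ ¬ l.Nodup := by
  induction l with
  | nil => simp
  | cons a l ih =>
    cases l with
    | nil => simp
    | cons b l' =>
      obtain ⟨ha, htail⟩ := List.pairwise_cons.1 h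
      by_cases heq : a = b
      · subst heq
        simp
      · have hab : (a == b) = false := by simp [heq]
        have hz : ((a :: b :: l').zip (a :: b :: l').tail).any (fun p => p.1 == p.2)
            = ((b :: l').zip (b :: l').tail).any (fun p => p.1 == p.2) := by
          simp [List.zip, hab]
        rw [hz, ih htail]
        constructor
        · intro hnb hall
          exact hnb (List.nodup_cons.1 hall).2
        · intro hnall hnb
          refine hnall (List.nodup_cons.2 ⟨?_, hnb⟩)
          intro hmem
          rcases List.mem_cons.1 hmem with rfl | hmem'
          · exact heq rfl
          · have h1 : a ≤ b := ha b (by simp)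
            have h2 : b ≤ a := (List.pairwise_cons.1 htail).1 a hmem'
            exact heq (le_antisymm h1 h2)

lemma pvB_iff (dict : List String) : differByOne_alt dict = true ↔ ¬ (pvPats dict).Nodup := by
  unfold differByOne_alt
  have hpat : (dict.flatMap (fun s =>
      (PySem.List.pyRange 0 (PySem.Str.len s) 1).map (fun j =>
        PySem.List.slice s.toList none (some j) ++ ['?'] ++ PySem.List.slice s.toList (some (j + 1)) none)))
      = pvPats dict := rfl
  simp only [hpat, PySem.List.slice_from_one]
  rw [pvAdj_iff _ (PySem.List.sorted_pairwise (pvPats dict) (fun x => x))]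
  have hperm : (@PySem.List.sorted (List Char) (List Char) List.instLinearOrder.toLT
      LinearOrder.toDecidableLT (pvPats dict) (fun x => x) false).Perm (pvPats dict) :=
    @PySem.List.sorted_perm (List Char) (List Char) List.instLinearOrder.toLT
      LinearOrder.toDecidableLT (pvPats dict) (fun x => x) false
  rw [hperm.nodup_iff]

-- ===== VERDICT (by name: the statement is the Claim_ definition above) =====
theorem differByOne_spec : Claim_equal_differByOne := by
  intro dict _
  unfold Spec_differByOne
  exact Bool.eq_iff_iff.2 ((pvA_iff dict).trans (pvB_iff dict).symm)
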